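-- pv_equiv track=rewrite | github.com/nikhilgeorge98/HorseRacingAnalytics | utilities.py | maxlosestreaks
-- ===== SOURCE A (Python) =====
-- def maxlosestreaks(dfff, n=1):
--     lstreak = 0
--     maxlstreak = 0
--     for i in dfff:
--         if i != n:
--             lstreak += 1
--         if i == n:
--             if lstreak > maxlstreak:
--                 maxlstreak = lstreak
--             lstreak = 0
--     if lstreak > maxlstreak:
--         maxlstreak = lstreak
--
--     return maxlstreak
-- ===== SOURCE B (Python) =====
-- def maxlosestreaks(dfff, n=1):
--     best = 0
--     i = 0
--     L = len(dfff)
--     while i < L: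
--         if dfff[i] == n:
--             i += 1
--         else:
--             j = i
--             while j < L and dfff[j] != n:
--                 j += 1
--             if j - i > best:
--                 best = j - i
--             i = j
--     return best
-- ===== Notes on version B (the rewrite author's own statement) =====
-- stated objective: alternative
-- what changed: B scans run-by-run with two pointers (skip over n's, measure each maximal non-n run all at once) instead of A's flat element-wise scan maintaining current/maximum streak counters.
import Mathlib
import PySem

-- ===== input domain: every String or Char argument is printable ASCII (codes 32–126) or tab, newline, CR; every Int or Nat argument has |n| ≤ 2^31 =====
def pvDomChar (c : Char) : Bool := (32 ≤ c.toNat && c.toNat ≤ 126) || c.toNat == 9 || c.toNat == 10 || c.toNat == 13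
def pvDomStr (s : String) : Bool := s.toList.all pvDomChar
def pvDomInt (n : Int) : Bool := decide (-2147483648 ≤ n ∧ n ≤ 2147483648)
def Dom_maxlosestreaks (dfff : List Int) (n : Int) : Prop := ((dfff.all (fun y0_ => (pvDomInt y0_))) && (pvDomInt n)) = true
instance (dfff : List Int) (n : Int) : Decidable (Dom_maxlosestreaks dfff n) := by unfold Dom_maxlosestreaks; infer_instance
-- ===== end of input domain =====

-- B re-implements the longest non-n streak by a two-pointer run-by-run scan instead of A's flat counter scan; return values proved equal on all inputs.


-- ===== PORT A =====
def maxlosestreaks (dfff : List Int) (n : Int) : Int :=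
  let st := dfff.foldl (fun (p : Int × Int) i =>
    let lstreak := if i ≠ n then p.1 + 1 else p.1
    if i = n then (0, if lstreak > p.2 then lstreak else p.2) else (lstreak, p.2)) (0, 0)
  if st.1 > st.2 then st.1 else st.2

-- ===== PORT B =====
-- two-pointer run scan: skip an n, else measure the whole maximal non-n run (the inner while) and jump past it
def altGo (n : Int) (l : List Int) (best : Int) : Int :=
  match l with
  | [] => best
  | x :: xs =>
    if x = n then altGo n xs best
    else
      let run : Int := ((x :: xs).takeWhile (fun y => y ≠ n)).length
      altGo n ((x :: xs).dropWhile (fun y => y ≠ n)) (if run > best then run else best)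
termination_by l.length
decreasing_by
  · simp
  · have hle := List.length_dropWhile_le (fun y => !decide (y = n)) xs
    simp_all

def maxlosestreaks_alt (dfff : List Int) (n : Int) : Int := altGo n dfff 0

-- ===== PRECONDITION & SPEC =====
def Spec_maxlosestreaks (dfff : List Int) (n : Int) (out : Int) : Prop := out = maxlosestreaks_alt dfff n
instance (dfff : List Int) (n : Int) (out : Int) : Decidable (Spec_maxlosestreaks dfff n out) := by unfold Spec_maxlosestreaks; infer_instance

-- ===== CLAIM (what is proved, stated in full; the proofs are below) =====
def Claim_equal_maxlosestreaks : Prop := ∀ (dfff : List Int) (n : Int), Dom_maxlosestreaks dfff n → Spec_maxlosestreaks dfff n (maxlosestreaks dfff n)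

-- ===== LEMMAS AND PROOFS =====

-- reference value: longest streak of ≠n elements, given a current streak of length l
def S (n l : Int) : List Int → Int
  | [] => l
  | x :: xs => if x = n then max l (S n 0 xs) else S n (l + 1) xs

theorem S_nonneg (n : Int) (xs : List Int) : ∀ l : Int, 0 ≤ l → 0 ≤ S n l xs := by
  induction xs with
  | nil => intro l hl; simpa [S] using hl
  | cons x xs ih =>
    intro l hl
    simp only [S]
    split
    · exact le_max_of_le_left hl
    · exact ih (l + 1) (by omega)

theorem foldlA_eq (n : Int) (xs : List Int) : ∀ l m : Int,
    (if (xs.foldl (fun (p : Int × Int) i =>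
      let lstreak := if i ≠ n then p.1 + 1 else p.1
      if i = n then (0, if lstreak > p.2 then lstreak else p.2) else (lstreak, p.2)) (l, m)).1 >
      (xs.foldl (fun (p : Int × Int) i =>
      let lstreak := if i ≠ n then p.1 + 1 else p.1
      if i = n then (0, if lstreak > p.2 then lstreak else p.2) else (lstreak, p.2)) (l, m)).2
     then (xs.foldl (fun (p : Int × Int) i =>
      let lstreak := if i ≠ n then p.1 + 1 else p.1
      if i = n then (0, if lstreak > p.2 then lstreak else p.2) else (lstreak, p.2)) (l, m)).1
     else (xs.foldl (fun (p : Int × Int) i =>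
      let lstreak := if i ≠ n then p.1 + 1 else p.1
      if i = n then (0, if lstreak > p.2 then lstreak else p.2) else (lstreak, p.2)) (l, m)).2)
    = max m (S n l xs) := by
  set f : Int × Int → Int → Int × Int := (fun (p : Int × Int) i =>
      let lstreak := if i ≠ n then p.1 + 1 else p.1
      if i = n then (0, if lstreak > p.2 then lstreak else p.2) else (lstreak, p.2)) with hf
  induction xs with
  | nil => intro l m; simp only [List.foldl_nil, S]; split_ifs <;> omega
  | cons x xs ih =>
    intro l m
    rw [List.foldl_cons]
    by_cases hx : x = n
    · have hstep : f (l, m) x = ((0 : Int), if l > m then l else m) := by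
        rw [hf]; simp [hx]
      rw [hstep, ih, S, if_pos hx]
      split_ifs <;> omega
    · have hstep : f (l, m) x = ((l + 1 : Int), m) := by
        rw [hf]; simp [hx]
      rw [hstep, ih, S, if_neg hx]

theorem S_split (n : Int) (xs : List Int) : ∀ l : Int, 0 ≤ l →
    S n l xs = max (l + ((xs.takeWhile (fun y => y ≠ n)).length : Int))
                   (S n 0 (xs.dropWhile (fun y => y ≠ n))) := by
  induction xs with
  | nil => intro l hl; simp [S]; omega
  | cons x xs ih =>
    intro l hl
    have h0 : 0 ≤ S n 0 (xs.dropWhile (fun y => y ≠ n)) := S_nonneg n _ 0 le_rfl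
    by_cases hx : x = n
    · have h0' : 0 ≤ S n 0 xs := S_nonneg n xs 0 le_rfl
      subst hx
      simp [S]
      omega
    · have ht : (x :: xs).takeWhile (fun y => y ≠ n) = x :: xs.takeWhile (fun y => y ≠ n) := by
        simp [List.takeWhile_cons, hx]
      have hd : (x :: xs).dropWhile (fun y => y ≠ n) = xs.dropWhile (fun y => y ≠ n) := by
        simp [List.dropWhile_cons, hx]
      rw [ht, hd]
      simp only [S, if_neg hx, List.length_cons]
      rw [ih (l + 1) (by omega)]
      push_cast
      omega

theorem altGo_eq (n : Int) : ∀ (xs : List Int) (best : Int), 0 ≤ best →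
    altGo n xs best = max best (S n 0 xs) := by
  suffices H : ∀ k, ∀ xs : List Int, xs.length ≤ k → ∀ best : Int, 0 ≤ best →
      altGo n xs best = max best (S n 0 xs) from
    fun xs best hb => H xs.length xs le_rfl best hb
  intro k
  induction k with
  | zero =>
    intro xs h best hb
    have : xs = [] := List.length_eq_zero_iff.mp (Nat.le_zero.mp h)
    subst this
    simp [altGo, S]
    omega
  | succ k ih =>
    intro xs h best hb
    match xs with
    | [] => simp [altGo, S]; omega
    | x :: xs =>
      by_cases hx : x = n
      · have h0 : 0 ≤ S n 0 xs := S_nonneg n xs 0 le_rfl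
        rw [altGo, if_pos hx, ih xs (by simpa using Nat.lt_succ_iff.mp (Nat.lt_of_lt_of_le (by simp) h)) best hb]
        simp [S, hx]
        omega
      · rw [altGo, if_neg hx]
        have hdrop : ((x :: xs).dropWhile (fun y => y ≠ n)) = xs.dropWhile (fun y => y ≠ n) := by
          simp [hx]
        have hlen : (xs.dropWhile (fun y => y ≠ n)).length ≤ k := by
          have := List.length_dropWhile_le (fun y => decide (y ≠ n)) xs
          simp at h
          omega
        set run : Int := (((x :: xs).takeWhile (fun y => y ≠ n)).length : Int) with hrun
        have hrun0 : 0 ≤ run := by positivity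
        rw [hdrop, ih _ hlen _ (by split_ifs <;> omega)]
        have := S_split n (x :: xs) 0 le_rfl
        simp only [zero_add] at this
        rw [hdrop] at this
        rw [← hrun] at this
        have h0 : 0 ≤ S n 0 (xs.dropWhile (fun y => y ≠ n)) := S_nonneg n _ 0 le_rfl
        rw [this]
        split_ifs <;> omega

-- ===== VERDICT (by name: the statement is the Claim_ definition above) =====
theorem maxlosestreaks_spec : Claim_equal_maxlosestreaks := by
  intro dfff n _
  unfold Spec_maxlosestreaks maxlosestreaks maxlosestreaks_alt
  rw [altGo_eq n dfff 0 le_rfl]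
  exact foldlA_eq n dfff 0 0
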